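-- pv_equiv track=rewrite | github.com/killua4564/2019-AIS3-preexam | reverse/HolyGrenade/script.py | OO0o
-- ===== SOURCE A (Python) =====
-- def OO0o(arg):
-- 	arg = bytearray(arg, 'ascii')
-- 	for Oo0Ooo in range(0, len(arg), 4):
-- 		O0O0OO0O0O0 = arg[Oo0Ooo]
-- 		iiiii = arg[(Oo0Ooo + 1)]
-- 		ooo0OO = arg[(Oo0Ooo + 2)]
-- 		II1 = arg[(Oo0Ooo + 3)]
-- 		arg[Oo0Ooo + 2] = II1
-- 		arg[Oo0Ooo + 1] = O0O0OO0O0O0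
-- 		arg[Oo0Ooo + 3] = iiiii
-- 		arg[Oo0Ooo] = ooo0OO
--
-- 	return arg.decode('ascii')
-- ===== SOURCE B (Python) =====
-- def OO0o(arg):
--     b = arg.encode('ascii')
--     out = bytearray(len(b))
--     out[0::4] = b[2::4]
--     out[1::4] = b[0::4]
--     out[2::4] = b[3::4]
--     out[3::4] = b[1::4]
--     return out.decode('ascii')
-- ===== Notes on version B (the rewrite author's own statement) =====
-- stated objective: alternative
-- what changed: A walks the 4-byte groups once, swapping the four bytes of each group in place; B instead makes four staged strided-slice gather passes (b[2::4], b[0::4], b[3::4], b[1::4]) and scatters each whole stride into a fresh output buffer with slice assignment.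
import Mathlib
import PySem

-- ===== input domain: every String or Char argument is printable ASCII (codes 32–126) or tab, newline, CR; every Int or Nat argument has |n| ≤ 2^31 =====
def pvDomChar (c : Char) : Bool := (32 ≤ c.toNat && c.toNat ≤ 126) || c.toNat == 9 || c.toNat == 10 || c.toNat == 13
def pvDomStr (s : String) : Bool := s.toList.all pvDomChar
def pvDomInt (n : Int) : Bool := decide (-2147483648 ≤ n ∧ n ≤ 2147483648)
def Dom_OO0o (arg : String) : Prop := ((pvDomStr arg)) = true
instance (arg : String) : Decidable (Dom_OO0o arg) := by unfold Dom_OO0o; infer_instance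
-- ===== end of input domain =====

-- B replaces A's single in-place pass over 4-byte groups by four staged strided-slice
-- gather/scatter passes into a fresh buffer; objective: alternative (same cost).


-- ===== PORT A =====
-- loop body of A: read the four bytes of the group at n, then write them back permuted in place
-- (on inputs admitted by Pre_ every index is in range, so the getD default is never read)
def pvStepA (a : List Char) (n : Nat) : List Char :=
  let c0 := a.getD n ' '
  let c1 := a.getD (n + 1) ' '
  let c2 := a.getD (n + 2) ' '
  let c3 := a.getD (n + 3) ' '
  ((((a.set (n + 2) c3).set (n + 1) c0).set (n + 3) c1).set n c2)

def OO0o (arg : String) : String :=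
  let l := arg.toList
  String.ofList ((PySem.List.pyRange 0 (l.length : Int) 4).foldl (fun a i => pvStepA a i.toNat) l)

-- ===== PORT B =====
-- hand port of the step-4 slice b[k::4] (PySem.List.slice has no step): take one element,
-- skip three; exact for a list starting at offset k
def pvStride4 : List Char → List Char
  | c0 :: _ :: _ :: _ :: t => c0 :: pvStride4 t
  | c0 :: _ => [c0]
  | [] => []

-- the four strided slice assignments out[0::4]=…, out[1::4]=…, out[2::4]=…, out[3::4]=…
-- riffle the four strides back together positionwise (exact when all strides have equal
-- length, i.e. whenever the Python slice assignments succeed)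
def pvScatter4 : List Char → List Char → List Char → List Char → List Char
  | a :: as, b :: bs, c :: cs, d :: ds => a :: b :: c :: d :: pvScatter4 as bs cs ds
  | _, _, _, _ => []

def OO0o_alt (arg : String) : String :=
  let l := arg.toList
  String.ofList (pvScatter4 (pvStride4 (l.drop 2)) (pvStride4 l)
                            (pvStride4 (l.drop 3)) (pvStride4 (l.drop 1)))

-- ===== PRECONDITION & SPEC =====
-- Pre_ excludes exactly the inputs where Python A raises IndexError: lengths not divisible
-- by 4 (B raises there too, a ValueError from the mismatched slice assignment).
def Pre_OO0o (arg : String) : Prop := arg.toList.length % 4 = 0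
instance (arg : String) : Decidable (Pre_OO0o arg) := by unfold Pre_OO0o; infer_instance
def pvWitness_OO0o : String := "abcdefgh"

def Spec_OO0o (arg : String) (out : String) : Prop := out = OO0o_alt arg
instance (arg : String) (out : String) : Decidable (Spec_OO0o arg out) := by unfold Spec_OO0o; infer_instance

-- ===== CLAIM =====
def Claim_equal_OO0o : Prop := ∀ (arg : String), Dom_OO0o arg → Pre_OO0o arg → Spec_OO0o arg (OO0o arg)

-- ===== LEMMAS AND PROOFS =====

-- reference permutation: permute each 4-group, recursively
def pvPerm4 : List Char → List Char
  | c0 :: c1 :: c2 :: c3 :: t => c2 :: c0 :: c3 :: c1 :: pvPerm4 t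
  | l => l

lemma pvRange4 (m : Nat) :
    PySem.List.pyRange 0 (4 * (m : Int)) 4 = (List.range m).map (fun k : Nat => 4 * (k : Int)) := by
  rw [PySem.List.pyRange_of_pos _ _ (by norm_num)]
  rcases Nat.eq_zero_or_pos m with h | h
  · simp [h]
  · have hlt : (0 : Int) < 4 * m := by positivity
    rw [if_pos hlt]
    have : ((4 * (m : Int) - 0 + 4 - 1) / 4).toNat = m := by omega
    rw [this]
    exact List.map_congr_left (fun k _ => by ring)

lemma pvStepA_cons (x : Char) (a : List Char) (n : Nat) :
    pvStepA (x :: a) (n + 1) = x :: pvStepA a n := by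
  simp only [pvStepA]
  have h2 : n + 1 + 2 = (n + 2) + 1 := by omega
  have h3 : n + 1 + 3 = (n + 3) + 1 := by omega
  rw [h2, h3]
  simp [List.set_cons_succ]

lemma pvStepA_append (g t : List Char) (n : Nat) :
    pvStepA (g ++ t) (g.length + n) = g ++ pvStepA t n := by
  induction g with
  | nil => simp
  | cons x g ih =>
      have hl : (x :: g).length + n = (g.length + n) + 1 := by
        simp only [List.length_cons]; omega
      rw [hl, List.cons_append, pvStepA_cons, ih, List.cons_append]

lemma pvStepA_head (c0 c1 c2 c3 : Char) (t : List Char) :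
    pvStepA (c0 :: c1 :: c2 :: c3 :: t) 0 = c2 :: c0 :: c3 :: c1 :: t := by
  simp [pvStepA]

lemma pvFoldA_off : ∀ (m : Nat) (g t : List Char), t.length = 4 * m →
    (List.range m).foldl (fun a k => pvStepA a (g.length + 4 * k)) (g ++ t) = g ++ pvPerm4 t := by
  intro m
  induction m with
  | zero =>
      intro g t ht
      have : t = [] := List.eq_nil_of_length_eq_zero (by omega)
      simp [this, pvPerm4]
  | succ m ih =>
      intro g t ht
      match t, ht with
      | c0 :: c1 :: c2 :: c3 :: t', ht =>
        have ht' : t'.length = 4 * m := by simp at ht; omega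
        rw [List.range_succ_eq_map]
        simp only [List.foldl_cons, List.foldl_map]
        have hstep : pvStepA (g ++ c0 :: c1 :: c2 :: c3 :: t') (g.length + 4 * 0)
            = g ++ c2 :: c0 :: c3 :: c1 :: t' := by
          have h := pvStepA_append g (c0 :: c1 :: c2 :: c3 :: t') 0
          rw [pvStepA_head] at h
          rw [Nat.mul_zero]
          exact h
        rw [hstep]
        have hre : (g ++ c2 :: c0 :: c3 :: c1 :: t')
            = (g ++ [c2, c0, c3, c1]) ++ t' := by simp
        have hfun : ∀ (a : List Char) (k : Nat),
            pvStepA a (g.length + 4 * (k + 1)) = pvStepA a ((g ++ [c2, c0, c3, c1]).length + 4 * k) := by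
          intro a k
          congr 1
          simp only [List.length_append, List.length_cons, List.length_nil]
          omega
        calc (List.range m).foldl (fun a k => pvStepA a (g.length + 4 * (k + 1)))
              (g ++ c2 :: c0 :: c3 :: c1 :: t')
            = (List.range m).foldl (fun a k => pvStepA a ((g ++ [c2, c0, c3, c1]).length + 4 * k))
              ((g ++ [c2, c0, c3, c1]) ++ t') := by
              rw [hre]
              exact PySem.List.foldl_congr_mem _ _ _ _ (fun a k _ => hfun a k)
          _ = (g ++ [c2, c0, c3, c1]) ++ pvPerm4 t' := ih _ _ ht'
          _ = g ++ pvPerm4 (c0 :: c1 :: c2 :: c3 :: t') := by simp [pvPerm4]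

-- stride-head lemmas: peeling a 4-group off the front of a stride, for each offset
lemma pvStride4_off0 (c0 c1 c2 c3 : Char) (t : List Char) :
    pvStride4 (c0 :: c1 :: c2 :: c3 :: t) = c0 :: pvStride4 t := rfl

lemma pvStride4_off1 (c1 c2 c3 : Char) (t : List Char) (ht : t.length % 4 = 0) :
    pvStride4 (c1 :: c2 :: c3 :: t) = c1 :: pvStride4 (t.drop 1) := by
  match t with
  | [] => rfl
  | d :: t' => rfl

lemma pvStride4_off2 (c2 c3 : Char) (t : List Char) (ht : t.length % 4 = 0) :
    pvStride4 (c2 :: c3 :: t) = c2 :: pvStride4 (t.drop 2) := by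
  match t with
  | [] => rfl
  | [d] => simp at ht
  | d0 :: d1 :: t' => rfl

lemma pvStride4_off3 (c3 : Char) (t : List Char) (ht : t.length % 4 = 0) :
    pvStride4 (c3 :: t) = c3 :: pvStride4 (t.drop 3) := by
  match t with
  | [] => rfl
  | [d] => simp at ht
  | [d0, d1] => simp at ht
  | d0 :: d1 :: d2 :: t' => rfl

lemma pvScatterStride : ∀ (m : Nat) (l : List Char), l.length = 4 * m →
    pvScatter4 (pvStride4 (l.drop 2)) (pvStride4 l) (pvStride4 (l.drop 3)) (pvStride4 (l.drop 1))
      = pvPerm4 l := by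
  intro m
  induction m with
  | zero =>
      intro l hl
      have : l = [] := List.eq_nil_of_length_eq_zero (by omega)
      simp [this, pvStride4, pvScatter4, pvPerm4]
  | succ m ih =>
      intro l hl
      match l, hl with
      | c0 :: c1 :: c2 :: c3 :: t, hl =>
        have ht : t.length = 4 * m := by simp at hl; omega
        have htm : t.length % 4 = 0 := by omega
        have h2 : (c0 :: c1 :: c2 :: c3 :: t).drop 2 = c2 :: c3 :: t := rfl
        have h3 : (c0 :: c1 :: c2 :: c3 :: t).drop 3 = c3 :: t := rfl
        have h1 : (c0 :: c1 :: c2 :: c3 :: t).drop 1 = c1 :: c2 :: c3 :: t := rfl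
        rw [h2, h3, h1, pvStride4_off2 _ _ _ htm, pvStride4_off3 _ _ htm,
            pvStride4_off1 _ _ _ _ htm, pvStride4_off0]
        show c2 :: c0 :: c3 :: c1 ::
            pvScatter4 (pvStride4 (t.drop 2)) (pvStride4 t) (pvStride4 (t.drop 3)) (pvStride4 (t.drop 1))
          = pvPerm4 (c0 :: c1 :: c2 :: c3 :: t)
        rw [ih _ ht]
        simp [pvPerm4]

lemma pvFoldA_eq_perm (l : List Char) (h : l.length % 4 = 0) :
    (PySem.List.pyRange 0 (l.length : Int) 4).foldl (fun a i => pvStepA a i.toNat) l = pvPerm4 l := by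
  obtain ⟨m, hm⟩ : ∃ m, l.length = 4 * m := ⟨l.length / 4, by omega⟩
  have hcast : (l.length : Int) = 4 * (m : Int) := by exact_mod_cast hm
  rw [hcast, pvRange4, List.foldl_map]
  have htonat : ∀ k : Nat, (4 * (k : Int)).toNat = 4 * k := by intro k; omega
  have := pvFoldA_off m [] l hm
  simp only [List.length_nil, List.nil_append, Nat.zero_add] at this
  calc (List.range m).foldl (fun (a : List Char) (k : Nat) => pvStepA a (4 * (k : Int)).toNat) l
      = (List.range m).foldl (fun a k => pvStepA a (4 * k)) l :=
        PySem.List.foldl_congr_mem _ _ _ _ (fun a k _ => by rw [htonat k])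
    _ = pvPerm4 l := this

-- ===== VERDICT =====
theorem OO0o_spec : Claim_equal_OO0o := by
  intro arg _ hpre
  have hpre' : arg.toList.length % 4 = 0 := hpre
  unfold Spec_OO0o OO0o OO0o_alt
  simp only []
  refine congrArg String.ofList ?_
  obtain ⟨m, hm⟩ : ∃ m, arg.toList.length = 4 * m := ⟨arg.toList.length / 4, by omega⟩
  rw [pvFoldA_eq_perm _ hpre', pvScatterStride m _ hm]
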